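-- pv_equiv track=rewrite | github.com/Hugenz/CLASSEUR_NSI | Listes-piles-files/Exercice_Pile.py | hauteur_pile
-- ===== SOURCE A (Python) =====
-- def creer_pile_vide():
--     return []
--
-- def est_vide(P):
--     if P==[]:
--         return True
--     else:
--         return False
--
-- def empiler(P,e):
--     P.append(e)
--     return None
--
-- def depiler(P):
--     e=P.pop()
--     return e
--
-- def hauteur_pile(P):
--     Q=creer_pile_vide()
--     n=0
--     while not(est_vide(P)):
--         n+=1
--         x=depiler(P)
--         empiler(Q,x)
--     while not(est_vide(Q)):
--         x=depiler(Q)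
--         empiler(P,x)
--     return n
-- ===== SOURCE B (Python) =====
-- def hauteur_pile(P):
--     # the height of the stack is just the number of elements; no need to
--     # unstack/restack anything (and P is left untouched)
--     return len(P)
-- ===== Notes on version B (the rewrite author's own statement) =====
-- stated objective: faster
-- what changed: Replaces the pop-everything-onto-Q-then-restore double loop with a direct len(P), since the height is just the element count.
import Mathlib
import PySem

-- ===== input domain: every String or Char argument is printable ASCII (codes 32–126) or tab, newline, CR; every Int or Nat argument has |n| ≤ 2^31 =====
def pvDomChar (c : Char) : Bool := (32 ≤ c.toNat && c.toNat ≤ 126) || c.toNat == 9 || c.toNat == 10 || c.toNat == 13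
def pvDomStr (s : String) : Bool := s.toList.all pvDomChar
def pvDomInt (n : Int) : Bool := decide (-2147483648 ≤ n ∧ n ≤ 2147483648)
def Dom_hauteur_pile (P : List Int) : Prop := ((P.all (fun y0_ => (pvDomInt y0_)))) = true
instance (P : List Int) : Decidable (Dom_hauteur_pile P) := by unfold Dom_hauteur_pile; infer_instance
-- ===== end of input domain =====

-- B replaces A's pop-everything-onto-Q-then-restore double loop with len(P) (objective:
-- faster, O(1) vs O(n)). A mutates P transiently but restores it; B does not touch P;
-- the equivalence proved here is about the RETURN value.

-- ===== PORT A =====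
-- first while-loop: pop from P onto Q, counting
def hpLoop1 (P Q : List Int) (n : Int) : List Int × List Int × Int :=
  match h : PySem.List.pop? P with
  | none => (P, Q, n)
  | some (x, rest) => hpLoop1 rest (Q ++ [x]) (n + 1)
termination_by P.length
decreasing_by
  have := PySem.List.length_of_pop?_eq_some (i := -1) P h
  simp at this
  omega

-- second while-loop: pop from Q back onto P
def hpLoop2 (Q P : List Int) : List Int × List Int :=
  match h : PySem.List.pop? Q with
  | none => (Q, P)
  | some (x, rest) => hpLoop2 rest (P ++ [x])
termination_by Q.length
decreasing_by
  have := PySem.List.length_of_pop?_eq_some (i := -1) Q h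
  simp at this
  omega

def hauteur_pile (P : List Int) : Int :=
  let r1 := hpLoop1 P [] 0
  let _r2 := hpLoop2 r1.2.1 r1.1
  r1.2.2

-- ===== PORT B =====
def hauteur_pile_alt (P : List Int) : Int := P.length

-- ===== PRECONDITION & SPEC =====
def Spec_hauteur_pile (P : List Int) (out : Int) : Prop := out = hauteur_pile_alt P
instance (P : List Int) (out : Int) : Decidable (Spec_hauteur_pile P out) := by unfold Spec_hauteur_pile; infer_instance

-- ===== CLAIM (what is proved, stated in full; the proofs are below) =====
def Claim_equal_hauteur_pile : Prop := ∀ (P : List Int), Dom_hauteur_pile P → Spec_hauteur_pile P (hauteur_pile P)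

-- ===== LEMMAS AND PROOFS =====
lemma hpLoop1_count (P Q : List Int) (n : Int) :
    (hpLoop1 P Q n).2.2 = n + P.length := by
  fun_induction hpLoop1 P Q n with
  | case1 P Q n h =>
      cases P with
      | nil => simp
      | cons a as =>
          exfalso
          rcases List.eq_nil_or_concat (a :: as) with h' | ⟨ys, y, h'⟩
          · simp at h'
          · simp [h', List.concat_eq_append, PySem.List.pop?_last] at h
  | case2 P Q n x rest h ih =>
      have := PySem.List.length_of_pop?_eq_some (i := -1) P h
      simp at this
      rw [ih]
      omega

-- ===== VERDICT (by name: the statement is the Claim_ definition above) =====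
theorem hauteur_pile_spec : Claim_equal_hauteur_pile := by
  intro P _
  unfold Spec_hauteur_pile hauteur_pile hauteur_pile_alt
  rw [hpLoop1_count]
  simp
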